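-- pv_equiv track=rewrite | github.com/csorens2/Advent-of-Code | Solutions/2022/Day23/Day23.py | IsSolo
-- ===== SOURCE A (Python) =====
-- def UpPair():
--     check = lambda point, set: (
--         ((point[0] - 1, point[1]) not in set) and
--         ((point[0] - 1, point[1] - 1) not in set) and
--         ((point[0] - 1, point[1] + 1) not in set))
--     move = lambda point: (point[0] - 1, point[1])
--     return (check, move)
--
-- def DownPair():
--     check = lambda point, set: (
--         ((point[0] + 1, point[1]) not in set) and
--         ((point[0] + 1, point[1] - 1) not in set) and
--         ((point[0] + 1, point[1] + 1) not in set))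
--     move = lambda point: (point[0] + 1, point[1])
--     return (check, move)
--
-- def LeftPair():
--     check = lambda point, set: (
--         ((point[0], point[1] - 1) not in set) and
--         ((point[0] - 1, point[1] - 1) not in set) and
--         ((point[0] + 1, point[1] - 1) not in set))
--     move = lambda point: (point[0], point[1] - 1)
--     return (check, move)
--
-- def RightPair():
--     check = lambda point, set: (
--         ((point[0], point[1] + 1) not in set) and
--         ((point[0] - 1, point[1] + 1) not in set) and
--         ((point[0] + 1, point[1] + 1) not in set))
--     move = lambda point: (point[0], point[1] + 1)
--     return (check, move)
--
-- def IsSolo(point, elf_set):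
--     pairs = [
--         UpPair(),
--         RightPair(),
--         DownPair(),
--         LeftPair()
--     ]
--     checks = map(lambda x: x[0], pairs)
--     for check in checks:
--         if not check(point, elf_set):
--             return False
--     return True
-- ===== SOURCE B (Python) =====
-- OFFSETS = [(-1, -1), (-1, 0), (-1, 1), (0, -1), (0, 1), (1, -1), (1, 0), (1, 1)]
--
-- def IsSolo(point, elf_set):
--     x, y = point
--     return not any((x + dx, y + dy) in elf_set for dx, dy in OFFSETS)
-- ===== Notes on version B (the rewrite author's own statement) =====
-- stated objective: simpler
-- what changed: Replaces the four directional (check, move) lambda pairs and the map/early-return loop over checks with a single scan over the 8 fixed neighbor offsets using any().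
import Mathlib
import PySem

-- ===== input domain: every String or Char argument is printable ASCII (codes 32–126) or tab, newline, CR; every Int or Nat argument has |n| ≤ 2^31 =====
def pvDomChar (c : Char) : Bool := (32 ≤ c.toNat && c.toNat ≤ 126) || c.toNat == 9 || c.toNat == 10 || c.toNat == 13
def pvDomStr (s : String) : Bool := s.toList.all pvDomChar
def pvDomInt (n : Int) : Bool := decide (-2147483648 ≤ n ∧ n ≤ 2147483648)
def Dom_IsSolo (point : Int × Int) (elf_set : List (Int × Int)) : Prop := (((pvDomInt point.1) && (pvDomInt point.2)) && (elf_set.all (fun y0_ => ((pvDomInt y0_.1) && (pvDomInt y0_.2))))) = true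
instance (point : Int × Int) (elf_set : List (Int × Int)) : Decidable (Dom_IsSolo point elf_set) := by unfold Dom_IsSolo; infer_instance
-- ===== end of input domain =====

-- B changes the decomposition only (same asymptotic cost): one flat scan of the 8 neighbor
-- offsets instead of four directional (check, move) lambda pairs and a loop over the checks.

-- ===== PORT A =====
-- Each *Pair returns (check, move), as in the Python.
def UpPair : ((Int × Int) → List (Int × Int) → Bool) × ((Int × Int) → (Int × Int)) :=
  (fun point s =>
      (!s.contains (point.1 - 1, point.2)) &&
      (!s.contains (point.1 - 1, point.2 - 1)) &&
      (!s.contains (point.1 - 1, point.2 + 1)),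
   fun point => (point.1 - 1, point.2))

def DownPair : ((Int × Int) → List (Int × Int) → Bool) × ((Int × Int) → (Int × Int)) :=
  (fun point s =>
      (!s.contains (point.1 + 1, point.2)) &&
      (!s.contains (point.1 + 1, point.2 - 1)) &&
      (!s.contains (point.1 + 1, point.2 + 1)),
   fun point => (point.1 + 1, point.2))

def LeftPair : ((Int × Int) → List (Int × Int) → Bool) × ((Int × Int) → (Int × Int)) :=
  (fun point s =>
      (!s.contains (point.1, point.2 - 1)) &&
      (!s.contains (point.1 - 1, point.2 - 1)) &&
      (!s.contains (point.1 + 1, point.2 - 1)),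
   fun point => (point.1, point.2 - 1))

def RightPair : ((Int × Int) → List (Int × Int) → Bool) × ((Int × Int) → (Int × Int)) :=
  (fun point s =>
      (!s.contains (point.1, point.2 + 1)) &&
      (!s.contains (point.1 - 1, point.2 + 1)) &&
      (!s.contains (point.1 + 1, point.2 + 1)),
   fun point => (point.1, point.2 + 1))

-- the for-loop over `checks` with early `return False`
def IsSoloLoop (point : Int × Int) (elf_set : List (Int × Int)) :
    List ((Int × Int) → List (Int × Int) → Bool) → Bool
  | [] => true
  | check :: rest =>
      if !(check point elf_set) then false else IsSoloLoop point elf_set rest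

def IsSolo (point : Int × Int) (elf_set : List (Int × Int)) : Bool :=
  let pairs := [UpPair, RightPair, DownPair, LeftPair]
  let checks := pairs.map (fun x => x.1)
  IsSoloLoop point elf_set checks

-- ===== PORT B =====
def OFFSETS : List (Int × Int) :=
  [(-1, -1), (-1, 0), (-1, 1), (0, -1), (0, 1), (1, -1), (1, 0), (1, 1)]

def IsSolo_alt (point : Int × Int) (elf_set : List (Int × Int)) : Bool :=
  let x := point.1
  let y := point.2
  !(OFFSETS.any (fun d => elf_set.contains (x + d.1, y + d.2)))

-- ===== PRECONDITION & SPEC =====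
def Spec_IsSolo (point : Int × Int) (elf_set : List (Int × Int)) (out : Bool) : Prop := out = IsSolo_alt point elf_set
instance (point : Int × Int) (elf_set : List (Int × Int)) (out : Bool) : Decidable (Spec_IsSolo point elf_set out) := by unfold Spec_IsSolo; infer_instance

-- ===== CLAIM (what is proved, stated in full; the proofs are below) =====
def Claim_equal_IsSolo : Prop := ∀ (point : Int × Int) (elf_set : List (Int × Int)), Dom_IsSolo point elf_set → Spec_IsSolo point elf_set (IsSolo point elf_set)

-- ===== LEMMAS AND PROOFS =====

-- ===== VERDICT (by name: the statement is the Claim_ definition above) =====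
theorem IsSolo_spec : Claim_equal_IsSolo := by
  intro point elf_set _
  obtain ⟨x, y⟩ := point
  unfold Spec_IsSolo IsSolo IsSolo_alt OFFSETS UpPair DownPair LeftPair RightPair
  simp only [List.map, IsSoloLoop, List.any_cons, List.any_nil]
  have h1 : x + (-1 : Int) = x - 1 := by ring
  have h2 : y + (-1 : Int) = y - 1 := by ring
  have h3 : x + (0 : Int) = x := by ring
  have h4 : y + (0 : Int) = y := by ring
  rw [h1, h2, h3, h4]
  cases elf_set.contains (x - 1, y - 1) <;>
  cases elf_set.contains (x - 1, y) <;>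
  cases elf_set.contains (x - 1, y + 1) <;>
  cases elf_set.contains (x, y - 1) <;>
  cases elf_set.contains (x, y + 1) <;>
  cases elf_set.contains (x + 1, y - 1) <;>
  cases elf_set.contains (x + 1, y) <;>
  cases elf_set.contains (x + 1, y + 1) <;>
  simp_all
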